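-- pv_equiv track=rewrite | github.com/fut33v/wattattack_script | adminbot/clients_view.py | _match_favorite_bike_id
-- ===== SOURCE A (Python) =====
-- from typing import Any, Awaitable, Callable, Dict, Iterable, List, Optional, Tuple
--
-- def _match_favorite_bike_id(favorite_raw: Optional[str], bikes_map: Dict[int, Dict[str, Any]]) -> Optional[int]:
--     if not favorite_raw:
--         return None
--     needle = favorite_raw.strip().lower()
--     if not needle:
--         return None
--
--     exact_matches: List[int] = []
--     partial_matches: List[int] = []
--
--     for bike_id, bike in bikes_map.items():
--         title = (bike.get("title") or "").strip().lower()
--         owner = (bike.get("owner") or "").strip().lower()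
--         if title == needle or owner == needle:
--             exact_matches.append(bike_id)
--         elif needle in title or (owner and needle in owner):
--             partial_matches.append(bike_id)
--
--     if exact_matches:
--         return exact_matches[0]
--     if partial_matches:
--         return partial_matches[0]
--     return None
-- ===== SOURCE B (Python) =====
-- from typing import Any, Dict, Optional
--
-- def _match_favorite_bike_id(favorite_raw: Optional[str], bikes_map: Dict[int, Dict[str, Any]]) -> Optional[int]:
--     if not favorite_raw:
--         return None
--     needle = favorite_raw.strip().lower()
--     if not needle:
--         return None
--
--     # first pass: first exact match wins
--     for bike_id, bike in bikes_map.items():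
--         title = (bike.get("title") or "").strip().lower()
--         owner = (bike.get("owner") or "").strip().lower()
--         if title == needle or owner == needle:
--             return bike_id
--
--     # no exact match anywhere: first partial match wins
--     for bike_id, bike in bikes_map.items():
--         title = (bike.get("title") or "").strip().lower()
--         owner = (bike.get("owner") or "").strip().lower()
--         if needle in title or (owner and needle in owner):
--             return bike_id
--
--     return None
-- ===== Notes on version B (the rewrite author's own statement) =====
-- stated objective: simpler
-- what changed: Replaced the single loop that builds two accumulator lists (exact/partial) and inspects them afterwards by two independent early-return passes: first pass returns the first exact match, a second pass over the map returns the first partial match.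
import Mathlib
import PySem

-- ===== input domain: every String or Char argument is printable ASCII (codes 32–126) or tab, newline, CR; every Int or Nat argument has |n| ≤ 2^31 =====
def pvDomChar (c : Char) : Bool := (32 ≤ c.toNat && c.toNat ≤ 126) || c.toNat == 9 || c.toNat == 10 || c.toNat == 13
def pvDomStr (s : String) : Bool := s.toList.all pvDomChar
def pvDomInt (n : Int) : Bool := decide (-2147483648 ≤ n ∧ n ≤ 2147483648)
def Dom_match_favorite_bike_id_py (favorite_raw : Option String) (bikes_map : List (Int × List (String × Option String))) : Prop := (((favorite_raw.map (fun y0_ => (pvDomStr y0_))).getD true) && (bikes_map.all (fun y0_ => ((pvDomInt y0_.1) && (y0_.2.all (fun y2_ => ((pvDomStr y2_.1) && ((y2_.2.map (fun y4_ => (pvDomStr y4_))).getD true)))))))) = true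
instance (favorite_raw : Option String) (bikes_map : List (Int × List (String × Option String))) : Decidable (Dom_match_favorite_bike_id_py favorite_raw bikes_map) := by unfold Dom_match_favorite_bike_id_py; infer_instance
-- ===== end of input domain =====

-- B replaces A's two accumulator lists by two independent early-return passes (first exact match, else first partial match); same result, simpler control flow.

-- ===== PORT A =====
-- (bike.get(k) or "").strip().lower() — get may yield none (missing key) or some none (value None); both are falsy, as is "".
def pvNorm (bike : List (String × Option String)) (k : String) : String :=
  PySem.Str.lower (PySem.Str.strip ((((PySem.Dict.mk bike).get? k).getD none).getD ""))

def match_favorite_bike_id_py (favorite_raw : Option String) (bikes_map : List (Int × List (String × Option String))) : Option Int :=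
  match favorite_raw with
  | none => none
  | some s =>
    if s == "" then none else
    let needle := PySem.Str.lower (PySem.Str.strip s)
    if needle == "" then none else
    let acc := bikes_map.foldl (fun (acc : List Int × List Int) bp =>
      let title := pvNorm bp.2 "title"
      let owner := pvNorm bp.2 "owner"
      if (title == needle) || (owner == needle) then (acc.1 ++ [bp.1], acc.2)
      else if PySem.Str.isIn needle title || (!(owner == "") && PySem.Str.isIn needle owner) then (acc.1, acc.2 ++ [bp.1])
      else acc) ([], [])
    match acc.1 with
    | i :: _ => some i
    | [] =>
      match acc.2 with
      | i :: _ => some i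
      | [] => none

-- ===== PORT B =====
def match_favorite_bike_id_py_alt (favorite_raw : Option String) (bikes_map : List (Int × List (String × Option String))) : Option Int :=
  match favorite_raw with
  | none => none
  | some s =>
    if s == "" then none else
    let needle := PySem.Str.lower (PySem.Str.strip s)
    if needle == "" then none else
    match bikes_map.find? (fun bp => (pvNorm bp.2 "title" == needle) || (pvNorm bp.2 "owner" == needle)) with
    | some bp => some bp.1
    | none =>
      match bikes_map.find? (fun bp => PySem.Str.isIn needle (pvNorm bp.2 "title") || (!(pvNorm bp.2 "owner" == "") && PySem.Str.isIn needle (pvNorm bp.2 "owner"))) with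
      | some bp => some bp.1
      | none => none

-- ===== PRECONDITION & SPEC =====
def Spec_match_favorite_bike_id_py (favorite_raw : Option String) (bikes_map : List (Int × List (String × Option String))) (out : Option Int) : Prop := out = match_favorite_bike_id_py_alt favorite_raw bikes_map
instance (favorite_raw : Option String) (bikes_map : List (Int × List (String × Option String))) (out : Option Int) : Decidable (Spec_match_favorite_bike_id_py favorite_raw bikes_map out) := by unfold Spec_match_favorite_bike_id_py; infer_instance

-- ===== CLAIM (what is proved, stated in full; the proofs are below) =====
def Claim_equal_match_favorite_bike_id_py : Prop := ∀ (favorite_raw : Option String) (bikes_map : List (Int × List (String × Option String))), Dom_match_favorite_bike_id_py favorite_raw bikes_map → Spec_match_favorite_bike_id_py favorite_raw bikes_map (match_favorite_bike_id_py favorite_raw bikes_map)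

-- ===== LEMMAS AND PROOFS =====

-- A's exact / partial (elif) conditions, for a fixed needle
def pvExactB (needle : String) (bp : Int × List (String × Option String)) : Bool :=
  (pvNorm bp.2 "title" == needle) || (pvNorm bp.2 "owner" == needle)
def pvPartB (needle : String) (bp : Int × List (String × Option String)) : Bool :=
  PySem.Str.isIn needle (pvNorm bp.2 "title") || (!(pvNorm bp.2 "owner" == "") && PySem.Str.isIn needle (pvNorm bp.2 "owner"))

-- A's fold builds exactly (e ++ exact ids, p ++ partial-but-not-exact ids)
theorem pvFold_char (needle : String) (l : List (Int × List (String × Option String))) :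
    ∀ e p : List Int,
    (l.foldl (fun (acc : List Int × List Int) bp =>
      let title := pvNorm bp.2 "title"
      let owner := pvNorm bp.2 "owner"
      if (title == needle) || (owner == needle) then (acc.1 ++ [bp.1], acc.2)
      else if PySem.Str.isIn needle title || (!(owner == "") && PySem.Str.isIn needle owner) then (acc.1, acc.2 ++ [bp.1])
      else acc) (e, p))
    = (e ++ (l.filter (pvExactB needle)).map (·.1),
       p ++ (l.filter (fun bp => !pvExactB needle bp && pvPartB needle bp)).map (·.1)) := by
  induction l with
  | nil => intro e p; simp
  | cons hd tl ih =>
    intro e p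
    simp only [List.foldl_cons, List.filter_cons]
    by_cases hx : pvExactB needle hd
    · have hx' : (pvNorm hd.2 "title" == needle || pvNorm hd.2 "owner" == needle) = true := hx
      simp only [hx, hx', Bool.not_true, Bool.false_and, if_true, List.map_cons]
      rw [ih]
      simp [List.append_assoc]
    · have hx' : (pvNorm hd.2 "title" == needle || pvNorm hd.2 "owner" == needle) = false :=
        Bool.of_not_eq_true hx
      by_cases hp : pvPartB needle hd
      · have hp' : (PySem.Str.isIn needle (pvNorm hd.2 "title") || (!(pvNorm hd.2 "owner" == "") && PySem.Str.isIn needle (pvNorm hd.2 "owner"))) = true := hp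
        simp only [hx, hx', hp, hp', Bool.not_false, Bool.true_and, Bool.false_eq_true, if_false, if_true, List.map_cons]
        rw [ih]
        simp [List.append_assoc]
      · have hp' : (PySem.Str.isIn needle (pvNorm hd.2 "title") || (!(pvNorm hd.2 "owner" == "") && PySem.Str.isIn needle (pvNorm hd.2 "owner"))) = false :=
          by exact Bool.of_not_eq_true hp
        simp only [hx, hx', hp, hp', Bool.not_false, Bool.true_and, Bool.false_eq_true, if_false]
        exact ih e p

theorem pvHead_filter_map {α β : Type} (f : α → β) (q : α → Bool) (l : List α) :
    ((l.filter q).map f).head? = (l.find? q).map f := by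
  induction l with
  | nil => rfl
  | cons hd tl ih =>
    by_cases h : q hd <;> simp [h, ih]

-- once no exact match exists, the "not exact" conjunct in the elif is vacuous
theorem pvFind_part_of_no_exact (needle : String) (l : List (Int × List (String × Option String)))
    (h : l.find? (pvExactB needle) = none) :
    l.find? (fun bp => !pvExactB needle bp && pvPartB needle bp) = l.find? (pvPartB needle) := by
  induction l with
  | nil => simp
  | cons hd tl ih =>
    by_cases hx : pvExactB needle hd = true
    · rw [List.find?_cons_of_pos hx] at h
      exact absurd h (by simp)
    · have hx' : pvExactB needle hd = false := Bool.of_not_eq_true hx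
      rw [List.find?_cons_of_neg hx] at h
      by_cases hp : pvPartB needle hd = true
      · rw [List.find?_cons_of_pos hp,
          List.find?_cons_of_pos (p := fun bp => !pvExactB needle bp && pvPartB needle bp) (show (!pvExactB needle hd && pvPartB needle hd) = true by
            rw [hx', hp]; rfl)]
      · have hp' : pvPartB needle hd = false := Bool.of_not_eq_true hp
        rw [List.find?_cons_of_neg hp,
          List.find?_cons_of_neg (p := fun bp => !pvExactB needle bp && pvPartB needle bp) (show ¬(!pvExactB needle hd && pvPartB needle hd) = true by
            rw [hx', hp']; simp)]
        exact ih h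

-- the two loop bodies agree, for any fixed nonempty needle
theorem pvCore (needle : String) (l : List (Int × List (String × Option String))) :
    (match (l.foldl (fun (acc : List Int × List Int) bp =>
      let title := pvNorm bp.2 "title"
      let owner := pvNorm bp.2 "owner"
      if (title == needle) || (owner == needle) then (acc.1 ++ [bp.1], acc.2)
      else if PySem.Str.isIn needle title || (!(owner == "") && PySem.Str.isIn needle owner) then (acc.1, acc.2 ++ [bp.1])
      else acc) ([], [])).1 with
     | i :: _ => some i
     | [] =>
       match (l.foldl (fun (acc : List Int × List Int) bp =>
         let title := pvNorm bp.2 "title"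
         let owner := pvNorm bp.2 "owner"
         if (title == needle) || (owner == needle) then (acc.1 ++ [bp.1], acc.2)
         else if PySem.Str.isIn needle title || (!(owner == "") && PySem.Str.isIn needle owner) then (acc.1, acc.2 ++ [bp.1])
         else acc) ([], [])).2 with
       | i :: _ => some i
       | [] => none)
    = (match l.find? (pvExactB needle) with
       | some bp => some bp.1
       | none =>
         match l.find? (pvPartB needle) with
         | some bp => some bp.1
         | none => none) := by
  have hfold := pvFold_char needle l [] []
  simp only [List.nil_append] at hfold
  rw [hfold]
  cases hfe : l.find? (pvExactB needle) with
  | some bp =>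
    have h1 : ((l.filter (pvExactB needle)).map (·.1)).head? = some bp.1 := by
      rw [pvHead_filter_map, hfe]; rfl
    cases hl : (l.filter (pvExactB needle)).map (·.1) with
    | nil => rw [hl] at h1; exact absurd h1 (by simp)
    | cons i t =>
      rw [hl] at h1
      simp only [List.head?_cons, Option.some.injEq] at h1
      simp [h1]
  | none =>
    have h1 := pvHead_filter_map (fun x : Int × List (String × Option String) => x.1) (pvExactB needle) l
    rw [hfe] at h1
    have h0 : (l.filter (pvExactB needle)).map (·.1) = [] := by
      cases hl : (l.filter (pvExactB needle)).map (·.1) with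
      | nil => rfl
      | cons i t => rw [hl] at h1; simp at h1
    rw [h0]
    have hpf := pvFind_part_of_no_exact needle l hfe
    have h2 := pvHead_filter_map (fun x : Int × List (String × Option String) => x.1)
      (fun bp => !pvExactB needle bp && pvPartB needle bp) l
    rw [hpf] at h2
    cases hfp : l.find? (pvPartB needle) with
    | some bp =>
      rw [hfp] at h2
      cases hl : (l.filter (fun bp => !pvExactB needle bp && pvPartB needle bp)).map (·.1) with
      | nil => rw [hl] at h2; simp at h2
      | cons i t =>
        rw [hl] at h2
        simp only [List.head?_cons, Option.map_some, Option.some.injEq] at h2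
        simp [h2]
    | none =>
      rw [hfp] at h2
      cases hl : (l.filter (fun bp => !pvExactB needle bp && pvPartB needle bp)).map (·.1) with
      | nil => rfl
      | cons i t => rw [hl] at h2; simp at h2

-- ===== VERDICT (by name: the statement is the Claim_ definition above) =====
theorem match_favorite_bike_id_py_spec : Claim_equal_match_favorite_bike_id_py := by
  intro favorite_raw bikes_map _
  unfold Spec_match_favorite_bike_id_py match_favorite_bike_id_py match_favorite_bike_id_py_alt
  match favorite_raw with
  | none => rfl
  | some s =>
    by_cases hs : s == "" <;> simp only [hs, if_true, if_false, Bool.false_eq_true]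
    by_cases hn : PySem.Str.lower (PySem.Str.strip s) == "" <;>
      simp only [hn, if_true, if_false, Bool.false_eq_true]
    exact pvCore (PySem.Str.lower (PySem.Str.strip s)) bikes_map
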